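-- pv_equiv track=rewrite | github.com/Innit-Bruv/Time-Read | backend/services/recommender.py | _keyword_sort
-- ===== SOURCE A (Python) =====
-- def _keyword_sort(items: list[dict], topic: str) -> list[dict]:
--     """Sort recommendation items so title/source keyword matches surface first.
--
--     Scores each item by how many topic words appear in its title or source.
--     Preserves original order within equal-score groups (stable sort).
--     Used as a lightweight fallback/supplement when vector search is unavailable
--     or when topic filtering should apply across non-embedding tiers.
--     """
--     topic_words = [w.lower() for w in topic.split() if len(w) > 2]
--     if not topic_words:
--         return items
--
--     def score(item: dict) -> int:
--         haystack = f"{item.get('title', '')} {item.get('source', '')}".lower()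
--         return sum(1 for w in topic_words if w in haystack)
--
--     return sorted(items, key=score, reverse=True)
-- ===== SOURCE B (Python) =====
-- def _keyword_sort(items: list[dict], topic: str) -> list[dict]:
--     """Bucket (counting) sort by topic-keyword match count, highest first, stable."""
--     topic_words = [w.lower() for w in topic.split() if len(w) > 2]
--     if not topic_words:
--         return items
--
--     def score(item: dict) -> int:
--         haystack = f"{item.get('title', '')} {item.get('source', '')}".lower()
--         return sum(1 for w in topic_words if w in haystack)
--
--     scored = [(score(item), item) for item in items]
--     out = []
--     for k in reversed(range(len(topic_words) + 1)):
--         out.extend(item for s, item in scored if s == k)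
--     return out
-- ===== Notes on version B (the rewrite author's own statement) =====
-- stated objective: alternative
-- what changed: Replaces the comparison sort (sorted with key, reverse=True) by a counting/bucket pass: each item's score is computed once into a (score, item) list, then items are emitted by scanning score values from len(topic_words) down to 0, preserving input order within equal scores.
import Mathlib
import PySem

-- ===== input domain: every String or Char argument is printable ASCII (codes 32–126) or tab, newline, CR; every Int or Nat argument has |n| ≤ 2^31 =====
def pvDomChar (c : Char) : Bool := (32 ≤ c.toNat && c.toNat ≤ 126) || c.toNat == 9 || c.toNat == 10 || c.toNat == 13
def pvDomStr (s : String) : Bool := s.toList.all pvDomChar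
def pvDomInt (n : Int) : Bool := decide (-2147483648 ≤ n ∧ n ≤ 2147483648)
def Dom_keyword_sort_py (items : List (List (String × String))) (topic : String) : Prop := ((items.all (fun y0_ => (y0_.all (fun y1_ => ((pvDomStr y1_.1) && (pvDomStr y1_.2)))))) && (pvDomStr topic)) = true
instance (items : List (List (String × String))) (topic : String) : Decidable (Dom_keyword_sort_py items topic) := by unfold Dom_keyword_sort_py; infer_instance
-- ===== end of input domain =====

-- B replaces A's comparison sort by a stable counting/bucket pass over the score values (same output; objective: alternative algorithm).

-- ===== PORT A =====
-- score of one item: number of topic words occurring in "title source" lowercased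
def pvScore (topic_words : List String) (item : List (String × String)) : Int :=
  let haystack := PySem.Str.lower (PySem.Dict.getD (PySem.Dict.mk item) "title" "" ++ " " ++ PySem.Dict.getD (PySem.Dict.mk item) "source" "")
  ((topic_words.countP (fun w => PySem.Str.isIn w haystack) : Nat) : Int)

def keyword_sort_py (items : List (List (String × String))) (topic : String) : List (List (String × String)) :=
  let topic_words := ((PySem.Str.split₀ topic).filter (fun w => 2 < PySem.Str.len w)).map PySem.Str.lower
  if topic_words = [] then items
  else PySem.List.sorted items (pvScore topic_words) true

-- ===== PORT B =====
def keyword_sort_py_alt (items : List (List (String × String))) (topic : String) : List (List (String × String)) :=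
  let topic_words := ((PySem.Str.split₀ topic).filter (fun w => 2 < PySem.Str.len w)).map PySem.Str.lower
  if topic_words = [] then items
  else
    let scored := items.map (fun item => (pvScore topic_words item, item))
    ((List.range (topic_words.length + 1)).reverse).foldl
      (fun out (k : Nat) => out ++ (scored.filter (fun p => p.1 == (k : Int))).map (fun p => p.2)) []

-- ===== PRECONDITION & SPEC =====
def Spec_keyword_sort_py (items : List (List (String × String))) (topic : String) (out : List (List (String × String))) : Prop := out = keyword_sort_py_alt items topic
instance (items : List (List (String × String))) (topic : String) (out : List (List (String × String))) : Decidable (Spec_keyword_sort_py items topic out) := by unfold Spec_keyword_sort_py; infer_instance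

-- ===== CLAIM (what is proved, stated in full; the proofs are below) =====
def Claim_equal_keyword_sort_py : Prop := ∀ (items : List (List (String × String))) (topic : String), Dom_keyword_sort_py items topic → Spec_keyword_sort_py items topic (keyword_sort_py items topic)

-- ===== LEMMAS AND PROOFS =====

-- inserting x into A ++ B where x goes after all of A and before B's head
lemma insertBy_append_split {α : Type} (before : α → α → Bool) (x : α) :
    ∀ (A B : List α), (∀ a ∈ A, before x a = false) →
      (∀ b t, B = b :: t → before x b = true) →
      PySem.List.insertBy before x (A ++ B) = A ++ x :: B := by
  intro A
  induction A with
  | nil =>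
    intro B _ hB
    cases B with
    | nil => simp [PySem.List.insertBy]
    | cons b t => simp [PySem.List.insertBy, hB b t rfl]
  | cons a A ih =>
    intro B hA hB
    simp only [List.cons_append, PySem.List.insertBy, hA a (by simp)]
    simp [ih B (fun a' ha' => hA a' (by simp [ha'])) hB]

lemma flatMap_congr_mem {α β : Type} {l : List α} {f g : α → List β}
    (h : ∀ x ∈ l, f x = g x) : l.flatMap f = l.flatMap g := by
  induction l with
  | nil => rfl
  | cons a t ih =>
    simp only [List.flatMap_cons, h a (by simp), ih (fun x hx => h x (by simp [hx]))]

-- appending x to the input appends x to its own bucket, which is exactly the stable insert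
lemma flatMap_filter_snoc {α : Type} (key : α → Int) (N : Nat) (x : α)
    (hx0 : 0 ≤ key x) (hxN : key x ≤ (N : Int)) (xs : List α) :
    ((List.range (N + 1)).reverse).flatMap (fun (k : Nat) => (xs ++ [x]).filter (fun y => key y == (k : Int)))
      = PySem.List.insertBy (fun a b => decide (key b < key a)) x
          (((List.range (N + 1)).reverse).flatMap (fun (k : Nat) => xs.filter (fun y => key y == (k : Int)))) := by
  set m : Nat := (key x).toNat with hmdef
  have hm : (m : Int) = key x := Int.toNat_of_nonneg hx0
  have hmN : m ≤ N := by omega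
  have hsplit : N + 1 = (m + 1) + (N - m) := by omega
  rw [hsplit, List.range_add, List.range_succ]
  simp only [List.reverse_append, List.reverse_cons, List.flatMap_append, List.flatMap_cons,
    List.nil_append, List.cons_append, List.append_assoc]
  -- name the three zones
  have hH : ∀ k ∈ ((List.range (N - m)).map (fun j => (m + 1) + j)).reverse,
      (xs ++ [x]).filter (fun y => key y == (k : Int)) = xs.filter (fun y => key y == (k : Int)) := by
    intro k hk
    simp only [List.mem_reverse, List.mem_map, List.mem_range] at hk
    obtain ⟨j, _, rfl⟩ := hk
    have hne : key x ≠ (m : Int) + 1 + (j : Int) := by omega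
    simp [List.filter_append, hne]
  have hL : ∀ k ∈ (List.range m).reverse,
      (xs ++ [x]).filter (fun y => key y == (k : Int)) = xs.filter (fun y => key y == (k : Int)) := by
    intro k hk
    simp only [List.mem_reverse, List.mem_range] at hk
    have hne : key x ≠ (k : Int) := by omega
    simp [List.filter_append, hne]
  have hMid : (xs ++ [x]).filter (fun y => key y == ((m : Nat) : Int))
      = xs.filter (fun y => key y == ((m : Nat) : Int)) ++ [x] := by
    simp [List.filter_append, hm]
  rw [flatMap_congr_mem hH, flatMap_congr_mem hL, hMid]
  -- now use the split-insert lemma with A = high buckets ++ own bucket, B = low buckets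
  have := insertBy_append_split (fun a b => decide (key b < key a)) x
    (((List.range (N - m)).map (fun j => (m + 1) + j)).reverse.flatMap
        (fun (k : Nat) => xs.filter (fun y => key y == (k : Int)))
      ++ xs.filter (fun y => key y == ((m : Nat) : Int)))
    ((List.range m).reverse.flatMap (fun (k : Nat) => xs.filter (fun y => key y == (k : Int))))
    (by
      intro a ha
      simp only [decide_eq_false_iff_not, not_lt]
      rcases List.mem_append.mp ha with ha | ha
      · obtain ⟨k, hk, hak⟩ := List.mem_flatMap.mp ha
        simp only [List.mem_reverse, List.mem_map, List.mem_range] at hk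
        obtain ⟨j, _, rfl⟩ := hk
        have := beq_iff_eq.mp ((List.mem_filter.mp hak).2)
        rw [this, ← hm]; push_cast; omega
      · have := beq_iff_eq.mp ((List.mem_filter.mp ha).2)
        rw [this, hm])
    (by
      intro b t hbt
      have hb : b ∈ (List.range m).reverse.flatMap (fun (k : Nat) => xs.filter (fun y => key y == (k : Int))) := by
        rw [hbt]; simp
      obtain ⟨k, hk, hbk⟩ := List.mem_flatMap.mp hb
      simp only [List.mem_reverse, List.mem_range] at hk
      have := beq_iff_eq.mp ((List.mem_filter.mp hbk).2)
      simp only [decide_eq_true_eq]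
      rw [this, ← hm]; exact_mod_cast hk)
  simp only [List.append_assoc] at this ⊢
  rw [this]
  simp

-- the bucket pass computes Python's stable reverse sort
lemma bucket_foldl_eq_sorted {α : Type} (key : α → Int) (N : Nat)
    (hb : ∀ x : α, 0 ≤ key x ∧ key x ≤ (N : Int)) (xs : List α) :
    ((List.range (N + 1)).reverse).foldl
        (fun out (k : Nat) => out ++ xs.filter (fun y => key y == (k : Int))) []
      = PySem.List.sorted xs key true := by
  rw [PySem.List.sorted_rev_eq_foldl_insertBy, PySem.List.foldl_append_eq_flatMap, List.nil_append]
  induction xs using List.reverseRecOn with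
  | nil => simp
  | append_singleton xs x ih =>
    rw [List.foldl_append, List.foldl_cons, List.foldl_nil, ← ih,
      flatMap_filter_snoc key N x (hb x).1 (hb x).2]

-- ===== VERDICT (by name: the statement is the Claim_ definition above) =====
theorem keyword_sort_py_spec : Claim_equal_keyword_sort_py := by
  intro items topic _
  unfold Spec_keyword_sort_py keyword_sort_py keyword_sort_py_alt
  set topic_words := ((PySem.Str.split₀ topic).filter (fun w => 2 < PySem.Str.len w)).map PySem.Str.lower with htw
  by_cases h : topic_words = []
  · simp [h]
  · simp only [h, if_false]
    have hfun : (fun (out : List (List (String × String))) (k : Nat) =>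
        out ++ ((items.map (fun item => (pvScore topic_words item, item))).filter
          (fun p => p.1 == (k : Int))).map (fun p => p.2))
      = fun out (k : Nat) => out ++ items.filter (fun y => pvScore topic_words y == (k : Int)) := by
      funext out k
      rw [List.filter_map, List.map_map]
      simp [Function.comp_def]
    rw [hfun, bucket_foldl_eq_sorted (pvScore topic_words) topic_words.length]
    intro x
    constructor
    · exact Int.natCast_nonneg _
    · simp only [pvScore]
      exact_mod_cast List.countP_le_length
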